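-- pv_equiv track=rewrite | github.com/nanma80/zomeable-4polytopes | lib/uniform_polyhedra.py | _signed_perms
-- ===== SOURCE A (Python) =====
-- from itertools import permutations, product
--
-- def _signed_perms(seq, even_only=False, even_signs_only=False):
--     """All (signed permutations) of seq.  Returns list of 3-tuples.
--
--     even_only=True keeps only even permutations of seq.
--     even_signs_only=True keeps only sign patterns with an even number of (-1)s.
--     """
--     out = set()
--     seq = tuple(seq)
--     for p in permutations(range(3)):
--         # parity
--         sgn = 1
--         for i in range(3):
--             for j in range(i + 1, 3):
--                 if p[i] > p[j]:
--                     sgn *= -1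
--         if even_only and sgn != 1:
--             continue
--         permuted = tuple(seq[p[k]] for k in range(3))
--         for signs in product((1, -1), repeat=3):
--             if even_signs_only:
--                 neg_count = sum(1 for s in signs if s == -1)
--                 if neg_count % 2 != 0:
--                     continue
--             v = tuple(signs[k] * permuted[k] for k in range(3))
--             out.add(v)
--     return [list(v) for v in out]
-- ===== SOURCE B (Python) =====
-- def _signed_perms(seq, even_only=False, even_signs_only=False):
--     """All (signed permutations) of seq, built recursively.
--
--     Permutations are generated by selection recursion (pick the element for
--     the first slot, recurse on the rest), with parity tracked by the parity
--     of the removal position instead of counting inversions.  Sign patterns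
--     are generated recursively too, pruning odd patterns at the leaves when
--     even_signs_only is set.
--     """
--     def perms(idxs):
--         if not idxs:
--             return [((), 1)]
--         return [((seq[idxs[k]],) + rest, sg if k % 2 == 0 else -sg)
--                 for k in range(len(idxs))
--                 for rest, sg in perms(idxs[:k] + idxs[k + 1:])]
--
--     def signed(vals, prod):
--         if not vals:
--             return [()] if (not even_signs_only or prod == 1) else []
--         return [(s * vals[0],) + rest
--                 for s in (1, -1)
--                 for rest in signed(vals[1:], prod * s)]
--
--     cand = [v for perm, sg in perms((0, 1, 2))
--               if not even_only or sg == 1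
--               for v in signed(perm, 1)]
--     return [list(v) for v in dict.fromkeys(cand)]
-- ===== Notes on version B (the rewrite author's own statement) =====
-- stated objective: alternative
-- what changed: Replaces itertools enumeration with inversion-counting and negative-sign-counting post-filters by two recursive generators: permutations are built by selection recursion with parity tracked by the removal position, and sign patterns are built recursively with odd patterns pruned at the leaves; dedup is dict.fromkeys instead of a set grown inside nested loops.
import Mathlib
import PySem

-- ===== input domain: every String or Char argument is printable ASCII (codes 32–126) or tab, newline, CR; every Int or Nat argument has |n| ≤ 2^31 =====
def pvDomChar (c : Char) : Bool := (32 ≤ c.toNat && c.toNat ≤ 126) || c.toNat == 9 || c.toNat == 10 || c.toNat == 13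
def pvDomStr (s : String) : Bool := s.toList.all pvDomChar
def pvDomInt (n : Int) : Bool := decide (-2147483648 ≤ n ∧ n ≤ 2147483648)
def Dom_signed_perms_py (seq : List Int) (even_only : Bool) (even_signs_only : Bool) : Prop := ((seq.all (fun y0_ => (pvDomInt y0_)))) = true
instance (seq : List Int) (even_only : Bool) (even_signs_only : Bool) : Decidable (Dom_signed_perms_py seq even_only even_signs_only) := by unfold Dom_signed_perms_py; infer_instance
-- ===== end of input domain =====

-- B builds the signed permutations RECURSIVELY (selection recursion for permutations with parity
-- tracked by the removal position, sign patterns generated recursively with odd patterns pruned at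
-- the leaves) instead of A's itertools enumeration with inversion counting and post-filtering:
-- simpler decomposition. The ports' return lists are in first-insertion order; Python iterates the
-- final set in hash order, so outputs are compared ignoring order.

-- ===== PORT A =====
-- permutations(range(3)) in itertools (lexicographic) order
def pvPerms3 : List (List Int) := [[0,1,2],[0,2,1],[1,0,2],[1,2,0],[2,0,1],[2,1,0]]
-- product((1,-1), repeat=3) in itertools order
def pvProdSigns : List (List Int) := [[1,1,1],[1,1,-1],[1,-1,1],[1,-1,-1],[-1,1,1],[-1,1,-1],[-1,-1,1],[-1,-1,-1]]
-- xs[i]: every index used in either port is provably in range (Pre_ gives len(seq) ≥ 3; p, signs,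
-- permuted have length 3), so the .getD 0 default is never taken
def pvGetI (xs : List Int) (i : Int) : Int := (PySem.List.pyGet? xs i).getD 0

def signed_perms_py (seq : List Int) (even_only : Bool) (even_signs_only : Bool) : List (List Int) :=
  let out : PySem.Set (List Int) :=
    pvPerms3.foldl (fun out p =>
      -- parity
      let sgn : Int :=
        (PySem.List.pyRange 0 3 1).foldl (fun sgn i =>
          (PySem.List.pyRange (i + 1) 3 1).foldl (fun sgn j =>
            if pvGetI p i > pvGetI p j then sgn * (-1) else sgn) sgn) 1
      if even_only && sgn != 1 then out
      else
        let permuted : List Int := (PySem.List.pyRange 0 3 1).map (fun k => pvGetI seq (pvGetI p k))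
        pvProdSigns.foldl (fun out signs =>
          if even_signs_only &&
             PySem.Int.mod (signs.foldl (fun n s => if s == -1 then n + 1 else n) (0 : Int)) 2 != 0 then out
          else
            PySem.Set.add out ((PySem.List.pyRange 0 3 1).map (fun k => pvGetI signs k * pvGetI permuted k)))
          out)
      PySem.Set.empty
  out

-- ===== PORT B =====
-- perms(idxs): selection recursion over the index list; parity flips with the removal position k
def pvPermsRec (seq : List Int) (idxs : List Nat) : List (List Int × Int) :=
  if idxs = [] then [([], 1)]
  else (List.range idxs.length).attach.flatMap (fun k =>
    (pvPermsRec seq (idxs.take k.1 ++ idxs.drop (k.1 + 1))).map (fun rs =>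
      (pvGetI seq (Int.ofNat (idxs.getD k.1 0)) :: rs.1,
       if k.1 % 2 = 0 then rs.2 else -rs.2)))
termination_by idxs.length
decreasing_by
  have hk := k.2; simp [List.mem_range] at hk
  simp only [List.length_append, List.length_take, List.length_drop]
  omega

-- signed(vals, prod): sign patterns built recursively, pruning odd patterns at the base case
def pvSigned (even_signs_only : Bool) : List Int → Int → List (List Int)
  | [], prod => if !even_signs_only || prod == 1 then [[]] else []
  | v :: vs, prod => ([1, -1] : List Int).flatMap (fun s =>
      (pvSigned even_signs_only vs (prod * s)).map (fun rest => s * v :: rest))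

def signed_perms_py_alt (seq : List Int) (even_only : Bool) (even_signs_only : Bool) : List (List Int) :=
  let cand := (pvPermsRec seq [0, 1, 2]).flatMap (fun psg =>
    if !even_only || psg.2 == 1 then pvSigned even_signs_only psg.1 1 else [])
  PySem.List.dedup cand

-- ===== PRECONDITION & SPEC =====
-- A evaluates seq[p[k]] for p[k] ∈ {0,1,2}: it raises IndexError iff len(seq) < 3 (B's seq[idxs[k]] likewise)
def Pre_signed_perms_py (seq : List Int) (even_only : Bool) (even_signs_only : Bool) : Prop := 3 ≤ seq.length
instance (seq : List Int) (even_only : Bool) (even_signs_only : Bool) : Decidable (Pre_signed_perms_py seq even_only even_signs_only) := by unfold Pre_signed_perms_py; infer_instance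
def pvWitness_signed_perms_py : List Int × Bool × Bool := ([1, 2, 3], false, false)

def Spec_signed_perms_py (seq : List Int) (even_only : Bool) (even_signs_only : Bool) (out : List (List Int)) : Prop := out = signed_perms_py_alt seq even_only even_signs_only
instance (seq : List Int) (even_only : Bool) (even_signs_only : Bool) (out : List (List Int)) : Decidable (Spec_signed_perms_py seq even_only even_signs_only out) := by unfold Spec_signed_perms_py; infer_instance

-- ===== CLAIM (what is proved, stated in full; the proofs are below) =====
def Claim_equal_signed_perms_py : Prop := ∀ (seq : List Int) (even_only : Bool) (even_signs_only : Bool), Dom_signed_perms_py seq even_only even_signs_only → Pre_signed_perms_py seq even_only even_signs_only → Spec_signed_perms_py seq even_only even_signs_only (signed_perms_py seq even_only even_signs_only)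

-- ===== LEMMAS AND PROOFS =====
theorem pvRange3 : PySem.List.pyRange 0 3 1 = [0, 1, 2] := by decide

theorem pvRange13 : PySem.List.pyRange 1 3 1 = [1, 2] := by decide

theorem pvRange23 : PySem.List.pyRange 2 3 1 = [2] := by decide

theorem pvRange33 : PySem.List.pyRange 3 3 1 = [] := by decide

theorem pvGetI0 (a : Int) (l : List Int) : pvGetI (a :: l) 0 = a := by simp [pysem, pvGetI]

theorem pvGetI1 (a b : Int) (l : List Int) : pvGetI (a :: b :: l) 1 = b := by simp [pysem, pvGetI]

theorem pvGetI2 (a b c : Int) (l : List Int) : pvGetI (a :: b :: c :: l) 2 = c := by simp [pysem, pvGetI]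

theorem pr_nil (seq : List Int) : pvPermsRec seq [] = [([], 1)] := by
  rw [pvPermsRec]; simp

theorem pr1 (seq : List Int) (i : Nat) :
    pvPermsRec seq [i] = [([pvGetI seq (Int.ofNat i)], 1)] := by
  rw [pvPermsRec]
  simp [List.range, List.range.loop, List.attach, List.attachWith, List.flatMap, pr_nil]

theorem pr2 (seq : List Int) (i j : Nat) :
    pvPermsRec seq [i, j] =
      [([pvGetI seq (Int.ofNat i), pvGetI seq (Int.ofNat j)], 1),
       ([pvGetI seq (Int.ofNat j), pvGetI seq (Int.ofNat i)], -1)] := by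
  rw [pvPermsRec]
  simp [List.range, List.range.loop, List.attach, List.attachWith, List.flatMap, pr1]

theorem pr3 (seq : List Int) :
    pvPermsRec seq [0, 1, 2] =
      [([pvGetI seq 0, pvGetI seq 1, pvGetI seq 2], 1),
       ([pvGetI seq 0, pvGetI seq 2, pvGetI seq 1], -1),
       ([pvGetI seq 1, pvGetI seq 0, pvGetI seq 2], -1),
       ([pvGetI seq 1, pvGetI seq 2, pvGetI seq 0], 1),
       ([pvGetI seq 2, pvGetI seq 0, pvGetI seq 1], 1),
       ([pvGetI seq 2, pvGetI seq 1, pvGetI seq 0], -1)] := by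
  rw [pvPermsRec]
  simp [List.range, List.range.loop, List.attach, List.attachWith, List.flatMap, pr2]

set_option maxHeartbeats 1000000 in
theorem signed_perms_core (a b c : Int) (rest : List Int) (eo es : Bool) :
    signed_perms_py (a :: b :: c :: rest) eo es
      = signed_perms_py_alt (a :: b :: c :: rest) eo es := by
  cases eo <;> cases es <;>
  simp only [signed_perms_py, signed_perms_py_alt, pvPerms3, pvProdSigns, pr3, pvSigned,
    pvRange3, pvRange13, pvRange23, pvRange33, pvGetI0, pvGetI1, pvGetI2,
    PySem.List.dedup_eq_ofList, PySem.Set.ofList_eq_foldl, PySem.Set.empty, PySem.Int.mod,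
    List.foldl, List.map, List.flatMap, List.flatten, List.append_nil, List.nil_append,
    List.cons_append, List.append_eq,
    Int.reduceAdd, Int.reduceMul, Int.reduceBEq, Int.reduceBNe, Int.reduceFMod,
    Int.reduceLT, gt_iff_lt,
    Bool.false_and, Bool.true_and, Bool.not_false, Bool.not_true, Bool.true_or, Bool.false_or,
    Bool.false_eq_true, eq_self_iff_true, if_false, if_true]

-- ===== VERDICT (by name: the statement is the Claim_ definition above) =====
theorem signed_perms_py_spec : Claim_equal_signed_perms_py := by
  intro seq even_only even_signs_only _ hpre
  unfold Spec_signed_perms_py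
  match seq, hpre with
  | a :: b :: c :: rest, _ => exact signed_perms_core a b c rest even_only even_signs_only
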